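-- pv_equiv track=rewrite | github.com/Devarshaa/KMeans-Image-Compression | ImgKMeans.py | newMeans
-- ===== SOURCE A (Python) =====
-- def newMeans(image, clusters, k):
--     means = {i:[0,0,0] for i in range(1, k+1)}
--     counts = [0 for _ in range(k + 1)]
--     rows = len(clusters)
--     cols = len(clusters[0])
--     for row in range(rows):
--         for col in range(cols):
--             cluster = clusters[row][col]
--             pixel = image[row][col]
--             for c in range(3):
--                 means[cluster][c] += pixel[c]
--             counts[cluster] += 1
--     for mean in means.keys():
--         if counts[mean] != 0:
--             for i in range(3):
--                 means[mean][i] //= counts[mean]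
--     return means
-- ===== SOURCE B (Python) =====
-- def newMeans(image, clusters, k):
--     # Two-pass: group pixels by cluster label, then reduce each group to its mean.
--     group = {i: [] for i in range(1, k + 1)}
--     rows = len(clusters)
--     cols = len(clusters[0])
--     for row in range(rows):
--         for col in range(cols):
--             group[clusters[row][col]].append(image[row][col])
--     means = {}
--     for i in range(1, k + 1):
--         pix = group[i]
--         if pix:
--             n = len(pix)
--             means[i] = [sum(p[c] for p in pix) // n for c in range(3)]
--         else:
--             means[i] = [0, 0, 0]
--     return means
-- ===== Notes on version B (the rewrite author's own statement) =====
-- stated objective: alternative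
-- what changed: B replaces A's in-place accumulate-then-divide over a dict of running sums and a counts array by a two-pass group-then-reduce: one pass groups pixels into per-cluster lists, a second differently-shaped pass over clusters 1..k reduces each group to its channel means.
import Mathlib
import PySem

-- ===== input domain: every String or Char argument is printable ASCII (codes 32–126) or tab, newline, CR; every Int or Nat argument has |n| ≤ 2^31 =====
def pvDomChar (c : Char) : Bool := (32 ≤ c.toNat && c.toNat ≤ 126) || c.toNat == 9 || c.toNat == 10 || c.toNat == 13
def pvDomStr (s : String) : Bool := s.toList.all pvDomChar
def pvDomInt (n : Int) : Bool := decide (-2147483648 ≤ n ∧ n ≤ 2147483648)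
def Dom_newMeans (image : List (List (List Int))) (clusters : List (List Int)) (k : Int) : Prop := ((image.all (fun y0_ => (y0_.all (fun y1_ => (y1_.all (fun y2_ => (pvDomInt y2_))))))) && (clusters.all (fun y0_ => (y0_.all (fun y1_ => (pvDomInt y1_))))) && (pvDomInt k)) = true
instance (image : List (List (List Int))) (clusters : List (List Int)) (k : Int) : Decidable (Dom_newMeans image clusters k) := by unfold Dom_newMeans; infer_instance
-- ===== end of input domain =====

-- B re-implements A's per-cluster mean (in-place accumulate + divide) as a two-pass group-then-reduce;
-- the return values are proved equal on Pre_ (exactly the inputs where Python A raises no exception).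

-- ===== PORT A =====
-- the body of A's double loop over (row, col), applied to (cluster, pixel)
def pvStepA (st : PySem.Dict Int (List Int) × List Int) (cp : Int × List Int) :
    PySem.Dict Int (List Int) × List Int :=
  ((PySem.List.pyRange 0 3 1).foldl
      (fun m c => m.modify cp.1 [0,0,0]
        (fun v => PySem.List.pySetD v c (PySem.List.pyGetD v c 0 + PySem.List.pyGetD cp.2 c 0))) st.1,
   PySem.List.pySetD st.2 cp.1 (PySem.List.pyGetD st.2 cp.1 0 + 1))

-- the body of A's final divide loop ('if counts[mean] != 0: for i in range(3): means[mean][i] //= counts[mean]')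
def pvStepDiv (counts : List Int) (m : PySem.Dict Int (List Int)) (mean : Int) :
    PySem.Dict Int (List Int) :=
  if PySem.List.pyGetD counts mean 0 ≠ 0 then
    (PySem.List.pyRange 0 3 1).foldl
      (fun m i => m.modify mean [0,0,0]
        (fun v => PySem.List.pySetD v i
          (PySem.Int.floordiv (PySem.List.pyGetD v i 0) (PySem.List.pyGetD counts mean 0)))) m
  else m

def newMeans (image : List (List (List Int))) (clusters : List (List Int)) (k : Int) : List (Int × List Int) :=
  let means0 : PySem.Dict Int (List Int) :=
    (PySem.List.pyRange 1 (k+1) 1).foldl (fun d i => d.insert i ([0,0,0] : List Int)) PySem.Dict.empty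
  let counts0 : List Int := (PySem.List.pyRange 0 (k+1) 1).map (fun _ => (0 : Int))
  let rows : Int := clusters.length
  let cols : Int := (PySem.List.pyGetD clusters 0 []).length
  let st := (PySem.List.pyRange 0 rows 1).foldl (fun st row =>
      (PySem.List.pyRange 0 cols 1).foldl (fun st col =>
        pvStepA st (PySem.List.pyGetD (PySem.List.pyGetD clusters row []) col 0,
                    PySem.List.pyGetD (PySem.List.pyGetD image row []) col [])) st)
      (means0, counts0)
  let means2 := st.1.keys.foldl (pvStepDiv st.2) st.1
  means2.items

-- ===== PORT B =====
-- the body of B's grouping loop ('group[clusters[row][col]].append(image[row][col])')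
def pvStepB (g : PySem.Dict Int (List (List Int))) (cp : Int × List Int) :
    PySem.Dict Int (List (List Int)) :=
  g.modify cp.1 [] (fun x => x ++ [cp.2])

-- the body of B's reduce loop over clusters 1..k
def pvReduceB (group : PySem.Dict Int (List (List Int))) (m : PySem.Dict Int (List Int)) (i : Int) :
    PySem.Dict Int (List Int) :=
  let pix := group.getD i []
  if pix ≠ [] then
    m.insert i ((PySem.List.pyRange 0 3 1).map (fun c =>
      PySem.Int.floordiv (pix.foldl (fun s p => s + PySem.List.pyGetD p c 0) 0) (pix.length : Int)))
  else m.insert i ([0,0,0] : List Int)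

def newMeans_alt (image : List (List (List Int))) (clusters : List (List Int)) (k : Int) : List (Int × List Int) :=
  let group0 : PySem.Dict Int (List (List Int)) :=
    (PySem.List.pyRange 1 (k+1) 1).foldl (fun d i => d.insert i ([] : List (List Int))) PySem.Dict.empty
  let rows : Int := clusters.length
  let cols : Int := (PySem.List.pyGetD clusters 0 []).length
  let group := (PySem.List.pyRange 0 rows 1).foldl (fun g row =>
      (PySem.List.pyRange 0 cols 1).foldl (fun g col =>
        pvStepB g (PySem.List.pyGetD (PySem.List.pyGetD clusters row []) col 0,
                   PySem.List.pyGetD (PySem.List.pyGetD image row []) col [])) g) group0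
  let means := (PySem.List.pyRange 1 (k+1) 1).foldl (pvReduceB group) PySem.Dict.empty
  means.items

-- ===== PRECONDITION & SPEC =====
-- Pre_ holds exactly where Python A returns normally: clusters non-empty (len(clusters[0])),
-- every visited index in range, every visited cluster label in 1..k (else KeyError),
-- every visited pixel with at least 3 channels (else IndexError).
def Pre_newMeans (image : List (List (List Int))) (clusters : List (List Int)) (k : Int) : Prop :=
  clusters ≠ [] ∧
  ∀ row ∈ List.range clusters.length, ∀ col ∈ List.range (clusters.getD 0 []).length,
    row < image.length ∧ col < (clusters.getD row []).length ∧ col < (image.getD row []).length ∧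
    1 ≤ (clusters.getD row []).getD col 0 ∧ (clusters.getD row []).getD col 0 ≤ k ∧
    3 ≤ ((image.getD row []).getD col []).length
instance (image : List (List (List Int))) (clusters : List (List Int)) (k : Int) : Decidable (Pre_newMeans image clusters k) := by unfold Pre_newMeans; infer_instance

def pvWitness_newMeans : List (List (List Int)) × List (List Int) × Int :=
  ([[[1,2,3],[4,5,7]]], [[1,2]], 2)

def Spec_newMeans (image : List (List (List Int))) (clusters : List (List Int)) (k : Int) (out : List (Int × List Int)) : Prop := out = newMeans_alt image clusters k
instance (image : List (List (List Int))) (clusters : List (List Int)) (k : Int) (out : List (Int × List Int)) : Decidable (Spec_newMeans image clusters k out) := by unfold Spec_newMeans; infer_instance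

-- ===== CLAIM (what is proved, stated in full; the proofs are below) =====
def Claim_equal_newMeans : Prop := ∀ (image : List (List (List Int))) (clusters : List (List Int)) (k : Int), Dom_newMeans image clusters k → Pre_newMeans image clusters k → Spec_newMeans image clusters k (newMeans image clusters k)

-- ===== LEMMAS AND PROOFS =====

-- the flattened list of (cluster, pixel) cells both double loops traverse
def pvCells (image : List (List (List Int))) (clusters : List (List Int)) : List (Int × List Int) :=
  (PySem.List.pyRange 0 (clusters.length : Int) 1).flatMap (fun row =>
    (PySem.List.pyRange 0 ((PySem.List.pyGetD clusters 0 []).length : Int) 1).map (fun col =>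
      (PySem.List.pyGetD (PySem.List.pyGetD clusters row []) col 0,
       PySem.List.pyGetD (PySem.List.pyGetD image row []) col [])))

-- the pixels of cluster i, in traversal order
def pvPix (L : List (Int × List Int)) (i : Int) : List (List Int) :=
  (L.filter (fun p => p.1 == i)).map (fun p => p.2)

-- channel-c sum of a pixel list
def pvSum (ps : List (List Int)) (c : Int) : Int :=
  (ps.map (fun p => PySem.List.pyGetD p c 0)).sum

-- the value B stores for cluster i
def pvValB (group : PySem.Dict Int (List (List Int))) (i : Int) : List Int :=
  let pix := group.getD i []
  if pix ≠ [] then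
    (PySem.List.pyRange 0 3 1).map (fun c =>
      PySem.Int.floordiv (pix.foldl (fun s p => s + PySem.List.pyGetD p c 0) 0) (pix.length : Int))
  else [0,0,0]

theorem pv_nested_foldl {σ β : Type} (g : σ → β → σ) (f : Int → Int → β) (C : Int) :
    ∀ (l : List Int) (init : σ),
    l.foldl (fun s row => (PySem.List.pyRange 0 C 1).foldl (fun s col => g s (f row col)) s) init
    = (l.flatMap (fun row => (PySem.List.pyRange 0 C 1).map (f row))).foldl g init := by
  intro l
  induction l with
  | nil => intro init; rfl
  | cons r t ih =>
    intro init
    simp only [List.foldl_cons, List.flatMap_cons, List.foldl_append, List.foldl_map, ih]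

theorem pv_getD_foldl_insert_const {ν : Type} (l : List Int) (c : ν) (i : Int) :
    ∀ (d : PySem.Dict Int ν), d.getD i c = c →
    (l.foldl (fun d j => d.insert j c) d).getD i c = c := by
  induction l with
  | nil => intro d h; exact h
  | cons j t ih =>
    intro d h
    refine ih _ ?_
    rw [PySem.Dict.getD_insert]
    split <;> simp [h]

theorem pv_mem_cells_of_pre (image : List (List (List Int))) (clusters : List (List Int)) (k : Int)
    (hpre : Pre_newMeans image clusters k) :
    ∀ p ∈ pvCells image clusters, (1 ≤ p.1 ∧ p.1 ≤ k) ∧ 3 ≤ p.2.length := by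
  intro p hp
  simp only [pvCells, List.mem_flatMap, List.mem_map] at hp
  obtain ⟨row, hrow, col, hcol, hpe⟩ := hp
  rw [PySem.List.mem_pyRange_one] at hrow hcol
  obtain ⟨_, h⟩ := hpre
  rw [PySem.List.pyGetD_zero] at hcol
  have hrow' : row.toNat ∈ List.range clusters.length := by rw [List.mem_range]; omega
  have hcol' : col.toNat ∈ List.range (clusters.getD 0 []).length := by rw [List.mem_range]; omega
  obtain ⟨h1, h2, h3, h4, h5, h6⟩ := h row.toNat hrow' col.toNat hcol'
  have e1 : PySem.List.pyGetD (PySem.List.pyGetD clusters row []) col 0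
      = (clusters.getD row.toNat []).getD col.toNat 0 := by
    rw [PySem.List.pyGetD_of_nonneg clusters [] hrow.1, PySem.List.pyGetD_of_nonneg _ 0 hcol.1]
  have e2 : PySem.List.pyGetD (PySem.List.pyGetD image row []) col []
      = (image.getD row.toNat []).getD col.toNat [] := by
    rw [PySem.List.pyGetD_of_nonneg image [] hrow.1, PySem.List.pyGetD_of_nonneg _ [] hcol.1]
  rw [← hpe]
  refine ⟨⟨?_, ?_⟩, ?_⟩
  · simpa [e1] using h4
  · simpa [e1] using h5
  · simpa [e2] using h6

theorem pvA_step_getD_self (m : PySem.Dict Int (List Int)) (cs : List Int) (cl : Int)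
    (px : List Int) (a0 a1 a2 : Int) (h : m.getD cl [0,0,0] = [a0,a1,a2]) :
    (pvStepA (m, cs) (cl, px)).1.getD cl [0,0,0]
      = [a0 + PySem.List.pyGetD px 0 0, a1 + PySem.List.pyGetD px 1 0, a2 + PySem.List.pyGetD px 2 0] := by
  have h3 : PySem.List.pyRange 0 3 1 = [0,1,2] := by decide
  simp only [pvStepA, h3, List.foldl_cons, List.foldl_nil]
  rw [PySem.Dict.getD_modify_self, PySem.Dict.getD_modify_self, PySem.Dict.getD_modify_self, h]
  simp [pysem]

theorem pvA_step_getD_ne (m : PySem.Dict Int (List Int)) (cs : List Int) (cl i : Int)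
    (px : List Int) (h : i ≠ cl) :
    (pvStepA (m, cs) (cl, px)).1.getD i [0,0,0] = m.getD i [0,0,0] := by
  have h3 : PySem.List.pyRange 0 3 1 = [0,1,2] := by decide
  simp only [pvStepA, h3, List.foldl_cons, List.foldl_nil]
  rw [PySem.Dict.getD_modify_of_ne _ _ _ h, PySem.Dict.getD_modify_of_ne _ _ _ h,
      PySem.Dict.getD_modify_of_ne _ _ _ h]

theorem pvA_means_getD (L : List (Int × List Int)) (i : Int) :
    ∀ (st : PySem.Dict Int (List Int) × List Int) (a0 a1 a2 : Int),
    st.1.getD i [0,0,0] = [a0,a1,a2] →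
    ((L.foldl pvStepA st).1).getD i [0,0,0]
      = [a0 + pvSum (pvPix L i) 0, a1 + pvSum (pvPix L i) 1, a2 + pvSum (pvPix L i) 2] := by
  induction L with
  | nil => intro st a0 a1 a2 h; simpa [pvPix, pvSum] using h
  | cons p t ih =>
    intro st a0 a1 a2 h
    obtain ⟨cl, px⟩ := p
    obtain ⟨m, cs⟩ := st
    by_cases hcl : cl = i
    · subst hcl
      rw [List.foldl_cons,
        ih _ (a0 + PySem.List.pyGetD px 0 0) (a1 + PySem.List.pyGetD px 1 0) (a2 + PySem.List.pyGetD px 2 0)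
          (pvA_step_getD_self m cs cl px a0 a1 a2 h)]
      simp only [pvPix, List.filter_cons, BEq.rfl, if_pos, List.map_cons, pvSum, List.sum_cons]
      simp [add_assoc]
    · rw [List.foldl_cons, ih _ a0 a1 a2 (by rw [pvA_step_getD_ne m cs cl i px (Ne.symm hcl)]; exact h)]
      have : ((cl, px).1 == i) = false := by simp [hcl]
      simp only [pvPix, List.filter_cons, this, Bool.false_eq_true, if_false]

theorem pvA_counts_getD (L : List (Int × List Int)) (i : Int) (hi : 0 ≤ i) :
    ∀ (st : PySem.Dict Int (List Int) × List Int),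
    (∀ p ∈ L, 0 ≤ p.1 ∧ p.1 < (st.2.length : Int)) →
    PySem.List.pyGetD ((L.foldl pvStepA st).2) i 0
      = PySem.List.pyGetD st.2 i 0 + ((pvPix L i).length : Int) := by
  induction L with
  | nil => intro st _; simp [pvPix]
  | cons p t ih =>
    intro st hL
    obtain ⟨cl, px⟩ := p
    obtain ⟨m, cs⟩ := st
    obtain ⟨hcl0, hcll⟩ := hL (cl, px) (List.mem_cons_self)
    have hcll' : cl < (cs.length : Int) := hcll
    have hlen : (pvStepA (m, cs) (cl, px)).2.length = cs.length := PySem.List.length_pySetD _ _ _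
    rw [List.foldl_cons, ih _ (fun p hp => by
      rw [hlen]; exact hL p (List.mem_cons_of_mem _ hp))]
    have hcl' : cl = ((cl.toNat : Nat) : Int) := by omega
    have hi' : i = ((i.toNat : Nat) : Int) := by omega
    have hlt : cl.toNat < cs.length := by omega
    have hpair : (pvStepA (m, cs) (cl, px)).2 = PySem.List.pySetD cs cl (PySem.List.pyGetD cs cl 0 + 1) := rfl
    have hset : PySem.List.pyGetD (pvStepA (m, cs) (cl, px)).2 i 0
        = if i.toNat = cl.toNat then PySem.List.pyGetD cs cl 0 + 1 else PySem.List.pyGetD cs i 0 := by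
      rw [hpair]
      conv_lhs => rw [hcl', hi']
      rw [PySem.List.pyGetD_pySetD_natCast cs cl.toNat i.toNat _ 0 hlt]
      rw [← hcl', ← hi']
    rw [hset]
    by_cases hcli : cl = i
    · rw [if_pos (by omega)]
      simp only [pvPix, List.filter_cons, hcli, beq_self_eq_true, if_pos, List.map_cons,
        List.length_cons]
      push_cast
      ring
    · rw [if_neg (by omega)]
      have hbe : ((cl, px).1 == i) = false := by simp [hcli]
      simp only [pvPix, List.filter_cons, hbe, Bool.false_eq_true, if_false]

theorem pv_keys_modify_mem {ν : Type} (d : PySem.Dict Int ν) (cl : Int) (d0 : ν) (f : ν → ν)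
    (h : cl ∈ d.keys) : (d.modify cl d0 f).keys = d.keys := by
  rw [PySem.Dict.keys_modify, PySem.Dict.keys_insert_of_contains]
  exact (PySem.Dict.contains_iff_mem_keys d cl).2 h

theorem pvA_step_keys (m : PySem.Dict Int (List Int)) (cs : List Int) (cl : Int) (px : List Int)
    (h : cl ∈ m.keys) : (pvStepA (m, cs) (cl, px)).1.keys = m.keys := by
  have h3 : PySem.List.pyRange 0 3 1 = [0,1,2] := by decide
  simp only [pvStepA, h3, List.foldl_cons, List.foldl_nil]
  have k1 : ∀ (d : PySem.Dict Int (List Int)), cl ∈ d.keys →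
      ∀ f : List Int → List Int, (d.modify cl ([0,0,0] : List Int) f).keys = d.keys :=
    fun d hd f => pv_keys_modify_mem d cl _ f hd
  have m1 : ∀ f, ((m.modify cl ([0,0,0] : List Int) f)).keys = m.keys := k1 m h
  have h1 : ∀ f, cl ∈ (m.modify cl ([0,0,0] : List Int) f).keys := fun f => by rw [m1 f]; exact h
  have m2 : ∀ f g, (((m.modify cl ([0,0,0] : List Int) f)).modify cl ([0,0,0] : List Int) g).keys = m.keys :=
    fun f g => by rw [k1 _ (h1 f) g, m1 f]
  have h2 : ∀ f g, cl ∈ (((m.modify cl ([0,0,0] : List Int) f)).modify cl ([0,0,0] : List Int) g).keys :=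
    fun f g => by rw [m2 f g]; exact h
  rw [k1 _ (h2 _ _) _, m2 _ _]

theorem pvA_keys (L : List (Int × List Int)) :
    ∀ (st : PySem.Dict Int (List Int) × List Int),
    (∀ p ∈ L, p.1 ∈ st.1.keys) →
    ((L.foldl pvStepA st).1).keys = st.1.keys := by
  induction L with
  | nil => intro st _; rfl
  | cons p t ih =>
    intro st hL
    obtain ⟨cl, px⟩ := p
    obtain ⟨m, cs⟩ := st
    have hk : (pvStepA (m, cs) (cl, px)).1.keys = m.keys :=
      pvA_step_keys m cs cl px (hL (cl, px) List.mem_cons_self)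
    rw [List.foldl_cons, ih _ (fun p hp => by
      rw [hk]; exact hL p (List.mem_cons_of_mem _ hp))]
    exact hk


theorem pvDiv_step_getD_ne (counts : List Int) (m : PySem.Dict Int (List Int)) (a i : Int)
    (h : i ≠ a) : (pvStepDiv counts m a).getD i [0,0,0] = m.getD i [0,0,0] := by
  have h3 : PySem.List.pyRange 0 3 1 = [0,1,2] := by decide
  simp only [pvStepDiv, h3, List.foldl_cons, List.foldl_nil]
  split
  · rw [PySem.Dict.getD_modify_of_ne _ _ _ h, PySem.Dict.getD_modify_of_ne _ _ _ h,
        PySem.Dict.getD_modify_of_ne _ _ _ h]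
  · rfl

theorem pvDiv_step_getD_self (counts : List Int) (m : PySem.Dict Int (List Int)) (i a0 a1 a2 : Int)
    (h : m.getD i [0,0,0] = [a0,a1,a2]) :
    (pvStepDiv counts m i).getD i [0,0,0]
      = if PySem.List.pyGetD counts i 0 ≠ 0 then
          [PySem.Int.floordiv a0 (PySem.List.pyGetD counts i 0),
           PySem.Int.floordiv a1 (PySem.List.pyGetD counts i 0),
           PySem.Int.floordiv a2 (PySem.List.pyGetD counts i 0)]
        else [a0,a1,a2] := by
  have h3 : PySem.List.pyRange 0 3 1 = [0,1,2] := by decide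
  simp only [pvStepDiv, h3, List.foldl_cons, List.foldl_nil]
  split
  · rw [PySem.Dict.getD_modify_self, PySem.Dict.getD_modify_self, PySem.Dict.getD_modify_self, h]
    simp [pysem]
  · exact h

theorem pvDiv_getD_not_mem (counts : List Int) (ms : List Int) (i : Int) (h : i ∉ ms) :
    ∀ (m : PySem.Dict Int (List Int)),
    (ms.foldl (pvStepDiv counts) m).getD i [0,0,0] = m.getD i [0,0,0] := by
  induction ms with
  | nil => intro m; rfl
  | cons a t ih =>
    intro m
    have hia : i ≠ a := fun e => h (e ▸ List.mem_cons_self)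
    rw [List.foldl_cons, ih (fun e => h (List.mem_cons_of_mem _ e)),
        pvDiv_step_getD_ne counts m a i hia]

theorem pvDiv_getD_mem (counts : List Int) (ms : List Int) (i : Int) :
    ms.Nodup → i ∈ ms →
    ∀ (m : PySem.Dict Int (List Int)) (a0 a1 a2 : Int), m.getD i [0,0,0] = [a0,a1,a2] →
    (ms.foldl (pvStepDiv counts) m).getD i [0,0,0]
      = if PySem.List.pyGetD counts i 0 ≠ 0 then
          [PySem.Int.floordiv a0 (PySem.List.pyGetD counts i 0),
           PySem.Int.floordiv a1 (PySem.List.pyGetD counts i 0),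
           PySem.Int.floordiv a2 (PySem.List.pyGetD counts i 0)]
        else [a0,a1,a2] := by
  induction ms with
  | nil => intro _ hi; exact absurd hi (List.not_mem_nil)
  | cons a t ih =>
    intro hnd hi m a0 a1 a2 h
    rw [List.foldl_cons]
    rcases List.mem_cons.1 hi with he | ht
    · subst he
      have hnin : i ∉ t := (List.nodup_cons.1 hnd).1
      rw [pvDiv_getD_not_mem counts t i hnin, pvDiv_step_getD_self counts m i a0 a1 a2 h]
    · have hia : i ≠ a := fun e => (List.nodup_cons.1 hnd).1 (e ▸ ht)
      exact ih (List.nodup_cons.1 hnd).2 ht _ a0 a1 a2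
        (by rw [pvDiv_step_getD_ne counts m a i hia]; exact h)

theorem pvDiv_step_keys (counts : List Int) (m : PySem.Dict Int (List Int)) (a : Int)
    (h : a ∈ m.keys) : (pvStepDiv counts m a).keys = m.keys := by
  have h3 : PySem.List.pyRange 0 3 1 = [0,1,2] := by decide
  simp only [pvStepDiv, h3, List.foldl_cons, List.foldl_nil]
  split
  · have k1 : ∀ (d : PySem.Dict Int (List Int)), a ∈ d.keys →
        ∀ f : List Int → List Int, (d.modify a ([0,0,0] : List Int) f).keys = d.keys :=
      fun d hd f => pv_keys_modify_mem d a _ f hd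
    have m1 : ∀ f, ((m.modify a ([0,0,0] : List Int) f)).keys = m.keys := k1 m h
    have h1 : ∀ f, a ∈ (m.modify a ([0,0,0] : List Int) f).keys := fun f => by rw [m1 f]; exact h
    have m2 : ∀ f g, (((m.modify a ([0,0,0] : List Int) f)).modify a ([0,0,0] : List Int) g).keys = m.keys :=
      fun f g => by rw [k1 _ (h1 f) g, m1 f]
    have h2 : ∀ f g, a ∈ (((m.modify a ([0,0,0] : List Int) f)).modify a ([0,0,0] : List Int) g).keys :=
      fun f g => by rw [m2 f g]; exact h
    rw [k1 _ (h2 _ _) _, m2 _ _]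
  · rfl

theorem pvDiv_keys (counts : List Int) (ms : List Int) :
    ∀ (m : PySem.Dict Int (List Int)), (∀ x ∈ ms, x ∈ m.keys) →
    (ms.foldl (pvStepDiv counts) m).keys = m.keys := by
  induction ms with
  | nil => intro m _; rfl
  | cons a t ih =>
    intro m hL
    have hk : (pvStepDiv counts m a).keys = m.keys :=
      pvDiv_step_keys counts m a (hL a List.mem_cons_self)
    rw [List.foldl_cons, ih _ (fun x hx => by rw [hk]; exact hL x (List.mem_cons_of_mem _ hx))]
    exact hk

-- both pipelines, run on an abstract cell list whose labels lie in 1..k, give the same items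
theorem pv_main (k : Int) (L : List (Int × List Int))
    (hcells : ∀ p ∈ L, (1 ≤ p.1 ∧ p.1 ≤ k) ∧ 3 ≤ p.2.length) :
    (let st := L.foldl pvStepA
        ((PySem.List.pyRange 1 (k+1) 1).foldl (fun d i => d.insert i ([0,0,0] : List Int)) PySem.Dict.empty,
         (PySem.List.pyRange 0 (k+1) 1).map (fun _ => (0 : Int)));
     (st.1.keys.foldl (pvStepDiv st.2) st.1).items)
    = ((PySem.List.pyRange 1 (k+1) 1).foldl
        (pvReduceB (L.foldl pvStepB
          ((PySem.List.pyRange 1 (k+1) 1).foldl (fun d i => d.insert i ([] : List (List Int))) PySem.Dict.empty)))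
        PySem.Dict.empty).items := by
  set rng := PySem.List.pyRange 1 (k+1) 1 with hrngdef
  set means0 : PySem.Dict Int (List Int) :=
    rng.foldl (fun d i => d.insert i ([0,0,0] : List Int)) PySem.Dict.empty with hm0def
  set counts0 : List Int := (PySem.List.pyRange 0 (k+1) 1).map (fun _ => (0 : Int)) with hc0def
  set group0 : PySem.Dict Int (List (List Int)) :=
    rng.foldl (fun d i => d.insert i ([] : List (List Int))) PySem.Dict.empty with hg0def
  set MA := L.foldl pvStepA (means0, counts0) with hMAdef
  set group := L.foldl pvStepB group0 with hgroupdef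
  have hnd : rng.Nodup := PySem.List.nodup_pyRange_one 1 (k+1)
  -- keys bookkeeping
  have hkeys0 : means0.keys = rng := by
    rw [hm0def, PySem.Dict.keys_foldl_insert, PySem.Dict.keys_empty,
        PySem.Set.update_nil_left, PySem.Set.ofList_eq_self_of_nodup _ hnd]
  have hlabels : ∀ p ∈ L, p.1 ∈ rng := by
    intro p hp
    obtain ⟨⟨h1, h2⟩, _⟩ := hcells p hp
    rw [hrngdef, PySem.List.mem_pyRange_one]
    omega
  have hkeysA : MA.1.keys = rng := by
    rw [hMAdef, pvA_keys L _ (fun p hp => by rw [hkeys0]; exact hlabels p hp)]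
    exact hkeys0
  have hkeysF : (MA.1.keys.foldl (pvStepDiv MA.2) MA.1).keys = rng := by
    rw [pvDiv_keys MA.2 MA.1.keys MA.1 (fun x hx => hx)]
    exact hkeysA
  -- A's items as a map over rng
  rw [PySem.Dict.items_eq_map_keys _ (by rw [hkeysF]; exact hnd) ([0,0,0] : List Int), hkeysF]
  -- B's items as a map over rng
  have hred : pvReduceB group = fun m i => m.insert i (pvValB group i) := by
    funext m i
    simp only [pvReduceB, pvValB]
    split <;> rfl
  rw [hred, PySem.Dict.items_foldl_insert_fresh rng (fun i => i) (fun i => pvValB group i)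
        PySem.Dict.empty (fun a _ => PySem.Dict.contains_empty a) (by simpa using hnd)]
  have hemp : (PySem.Dict.empty : PySem.Dict Int (List Int)).items = [] := rfl
  rw [hemp, List.nil_append]
  -- pointwise over i ∈ rng
  refine List.map_congr_left ?_
  intro i hi
  have hi' : 1 ≤ i ∧ i < k + 1 := PySem.List.mem_pyRange_one.1 hi
  -- counts bookkeeping
  have hclen : (counts0.length : Int) = k + 1 := by
    rw [hc0def, List.length_map, PySem.List.length_pyRange_one]
    omega
  have hcpre : ∀ p ∈ L, 0 ≤ p.1 ∧ p.1 < ((means0, counts0).2.length : Int) := by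
    intro p hp
    obtain ⟨⟨h1, h2⟩, _⟩ := hcells p hp
    have : ((means0, counts0).2.length : Int) = k + 1 := hclen
    omega
  have hn : PySem.List.pyGetD MA.2 i 0 = ((pvPix L i).length : Int) := by
    rw [hMAdef, pvA_counts_getD L i (by omega) (means0, counts0) hcpre]
    have : PySem.List.pyGetD (means0, counts0).2 i 0 = 0 := by
      show PySem.List.pyGetD counts0 i 0 = 0
      rw [hc0def]
      exact PySem.List.pyGetD_map_pyRange_of_nonneg (fun _ => (0:Int)) (k+1) i 0 (by omega) (by omega)
    rw [this, zero_add]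
  -- A's stored value at i
  have hm0 : (means0, counts0).1.getD i [0,0,0] = [0,0,0] := by
    show means0.getD i [0,0,0] = [0,0,0]
    rw [hm0def]
    exact pv_getD_foldl_insert_const rng ([0,0,0] : List Int) i PySem.Dict.empty
      (PySem.Dict.getD_empty i _)
  have hMA1 : MA.1.getD i [0,0,0]
      = [0 + pvSum (pvPix L i) 0, 0 + pvSum (pvPix L i) 1, 0 + pvSum (pvPix L i) 2] := by
    rw [hMAdef]
    exact pvA_means_getD L i (means0, counts0) 0 0 0 hm0
  have hdiv := pvDiv_getD_mem MA.2 rng i hnd hi MA.1 _ _ _ hMA1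
  rw [hkeysA, hdiv, hn]
  -- B's stored value at i
  have hgd : group.getD i [] = pvPix L i := by
    have hstepB : pvStepB = fun (d : PySem.Dict Int (List (List Int))) (p : Int × List Int) =>
        d.modify p.1 [] (fun x => x ++ [p.2]) := by funext d p; rfl
    rw [hgroupdef, hstepB, PySem.Dict.getD_foldl_modify_append L group0 i]
    have : group0.getD i [] = [] := by
      rw [hg0def]
      exact pv_getD_foldl_insert_const rng ([] : List (List Int)) i PySem.Dict.empty
        (PySem.Dict.getD_empty i _)
    rw [this, List.nil_append, pvPix]
  have h3 : PySem.List.pyRange 0 3 1 = [0,1,2] := by decide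
  simp only [pvValB, hgd, h3, List.map_cons, List.map_nil]
  by_cases hpix : pvPix L i = []
  · rw [if_neg (by simpa using hpix)]
    have hz : ∀ c : Int, pvSum (pvPix L i) c = 0 := by intro c; rw [hpix]; rfl
    rw [if_neg (by simp [hpix])]
    simp [hz]
  · have hsum : ∀ c : Int,
        (pvPix L i).foldl (fun s p => s + PySem.List.pyGetD p c 0) 0 = pvSum (pvPix L i) c := by
      intro c
      rw [PySem.List.foldl_add (pvPix L i) (fun p => PySem.List.pyGetD p c 0) 0, zero_add, pvSum]
    simp [hpix, hsum]

-- ===== VERDICT (by name: the statement is the Claim_ definition above) =====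
theorem newMeans_spec : Claim_equal_newMeans := by
  intro image clusters k _hdom hpre
  unfold Spec_newMeans
  simp only [newMeans, newMeans_alt]
  rw [pv_nested_foldl, pv_nested_foldl]
  exact pv_main k (pvCells image clusters) (pv_mem_cells_of_pre image clusters k hpre)
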